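-- pv_equiv track=rewrite | github.com/LiShuMing/xlab | python/projects/py-optimizer2/src/scanners/base.py | _clean_snippet
-- ===== SOURCE A (Python) =====
-- def _clean_snippet(snippet: str, max_tokens: int = 2000) -> str:
--     """Clean and truncate snippet to fit token budget."""
--     # Remove excessive whitespace
--     lines = snippet.split("\n")
--     cleaned = []
--     for line in lines:
--         stripped = line.rstrip()
--         if stripped or cleaned:  # Keep empty lines only if we have content
--             cleaned.append(stripped)
--
--     # Remove leading/trailing blank lines
--     while cleaned and not cleaned[0]:
--         cleaned.pop(0)
--     while cleaned and not cleaned[-1]: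
--         cleaned.pop()
--
--     result = "\n".join(cleaned)
--
--     # Rough token estimate: ~4 chars per token
--     max_chars = max_tokens * 4
--     if len(result) > max_chars:
--         result = result[:max_chars] + "\n// ... truncated"
--
--     return result
-- ===== SOURCE B (Python) =====
-- def _clean_snippet(snippet: str, max_tokens: int = 2000) -> str:
--     """Clean and truncate snippet to fit token budget."""
--     # rstrip every line, then trim blank lines at both ends by stripping
--     # the newline runs of the joined string itself.
--     result = "\n".join(line.rstrip() for line in snippet.split("\n")).strip("\n")
--
--     # Rough token estimate: ~4 chars per token
--     max_chars = max_tokens * 4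
--     if len(result) > max_chars:
--         result = result[:max_chars] + "\n// ... truncated"
--
--     return result
-- ===== Notes on version B (the rewrite author's own statement) =====
-- stated objective: simpler
-- what changed: B replaces A's conditional-append loop over lines plus the two pop-based blank-line trimming while-loops by a single rstrip-map, one join, and one strip of newline characters from both ends of the joined string.
import Mathlib
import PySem

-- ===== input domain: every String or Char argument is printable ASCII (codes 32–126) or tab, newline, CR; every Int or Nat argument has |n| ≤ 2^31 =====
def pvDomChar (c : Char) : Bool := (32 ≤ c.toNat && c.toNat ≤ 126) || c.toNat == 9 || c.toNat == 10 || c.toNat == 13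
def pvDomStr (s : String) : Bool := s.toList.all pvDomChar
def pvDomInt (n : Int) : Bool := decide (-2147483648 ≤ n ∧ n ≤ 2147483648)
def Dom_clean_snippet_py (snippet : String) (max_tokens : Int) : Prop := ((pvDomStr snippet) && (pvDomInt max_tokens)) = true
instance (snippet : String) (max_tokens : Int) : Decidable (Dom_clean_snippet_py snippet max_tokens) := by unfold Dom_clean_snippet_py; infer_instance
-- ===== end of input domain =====

-- B replaces A's conditional-append loop plus two pop-trimming while loops by one
-- rstrip-map and a single strip("\n") on the joined string (objective: simpler).

-- ===== PORT A =====
-- the 'for line in lines' loop with its conditional append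
def pvCleanLoop (lines : List String) : List String :=
  lines.foldl (fun cleaned line =>
    let stripped := PySem.Str.rstrip line
    if stripped ≠ "" ∨ cleaned ≠ [] then cleaned ++ [stripped] else cleaned) []

-- while cleaned and not cleaned[0]: cleaned.pop(0)
def pvPopLeading : List String → List String
  | [] => []
  | x :: xs => if x = "" then pvPopLeading xs else x :: xs

-- while cleaned and not cleaned[-1]: cleaned.pop()
def pvPopTrailing (l : List String) : List String :=
  match h : l.getLast? with
  | some x =>
      if x = "" then pvPopTrailing l.dropLast else l
  | none => l
termination_by l.length
decreasing_by
  have hne : l ≠ [] := by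
    intro hnil; rw [hnil] at h; simp at h
  have : 0 < l.length := List.length_pos_iff.mpr hne
  simp [List.length_dropLast]; omega

def clean_snippet_py (snippet : String) (max_tokens : Int) : String :=
  -- snippet.split("\n"): the separator is non-empty, so Str.split? is always `some`;
  -- the .getD [] default is never taken
  let lines := (PySem.Str.split? snippet "\n").getD []
  let cleaned := pvPopTrailing (pvPopLeading (pvCleanLoop lines))
  let result := PySem.Str.join "\n" cleaned
  let max_chars := max_tokens * 4
  if PySem.Str.len result > max_chars then
    PySem.Str.slice result none (some max_chars) ++ "\n// ... truncated"
  else result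

-- ===== PORT B =====
def clean_snippet_py_alt (snippet : String) (max_tokens : Int) : String :=
  -- "\n".join(line.rstrip() for line in snippet.split("\n")).strip("\n")
  let result := PySem.Str.stripChars
      (PySem.Str.join "\n" (((PySem.Str.split? snippet "\n").getD []).map PySem.Str.rstrip)) "\n"
  let max_chars := max_tokens * 4
  if PySem.Str.len result > max_chars then
    PySem.Str.slice result none (some max_chars) ++ "\n// ... truncated"
  else result

-- ===== PRECONDITION & SPEC =====
def Spec_clean_snippet_py (snippet : String) (max_tokens : Int) (out : String) : Prop := out = clean_snippet_py_alt snippet max_tokens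
instance (snippet : String) (max_tokens : Int) (out : String) : Decidable (Spec_clean_snippet_py snippet max_tokens out) := by unfold Spec_clean_snippet_py; infer_instance

-- ===== CLAIM (what is proved, stated in full; the proofs are below) =====
def Claim_equal_clean_snippet_py : Prop := ∀ (snippet : String) (max_tokens : Int), Dom_clean_snippet_py snippet max_tokens → Spec_clean_snippet_py snippet max_tokens (clean_snippet_py snippet max_tokens)

-- ===== LEMMAS AND PROOFS =====

-- equation lemmas for the fuel-based splitOn.go
theorem pv_go_nil (n : Nat) (cur : List Char) (acc : List (List Char)) :
    PySem.Chars.splitOn.go ['\n'] (n+1) [] cur acc = (cur.reverse :: acc).reverse := by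
  rw [PySem.Chars.splitOn.go]; simp

theorem pv_go_cons (n : Nat) (c : Char) (rest cur : List Char) (acc : List (List Char)) :
    PySem.Chars.splitOn.go ['\n'] (n+1) (c :: rest) cur acc =
      if List.isPrefixOf ['\n'] (c :: rest) = true then
        PySem.Chars.splitOn.go ['\n'] n (List.drop (List.length ['\n']) (c :: rest)) [] (cur.reverse :: acc)
      else PySem.Chars.splitOn.go ['\n'] n rest (c :: cur) acc := by
  rw [PySem.Chars.splitOn.go]

-- the parts produced by splitting on "\n" contain no '\n'
theorem pv_go_free : ∀ (fuel : Nat) (l cur : List Char) (acc : List (List Char)),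
    l.length < fuel → (∀ p ∈ acc, ('\n') ∉ p) → ('\n') ∉ cur →
    ∀ p ∈ PySem.Chars.splitOn.go ['\n'] fuel l cur acc, ('\n') ∉ p := by
  intro fuel
  induction fuel with
  | zero => intro l cur acc h; omega
  | succ n ih =>
    intro l cur acc hlen hacc hcur
    cases l with
    | nil =>
      intro p hp
      rw [pv_go_nil] at hp
      simp only [List.reverse_cons, List.mem_append, List.mem_reverse, List.mem_singleton] at hp
      rcases hp with h2 | h1
      · exact hacc p h2
      · subst h1; simpa using hcur
    | cons c rest =>
      rw [pv_go_cons]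
      by_cases hpre : List.isPrefixOf ['\n'] (c :: rest) = true
      · rw [if_pos hpre]
        apply ih
        · simp at hlen ⊢; omega
        · intro p hp
          simp only [List.mem_cons] at hp
          rcases hp with h1 | h2
          · subst h1; simpa using hcur
          · exact hacc p h2
        · simp
      · rw [if_neg hpre]
        have hc : c ≠ '\n' := by
          intro h; apply hpre; simp [List.isPrefixOf, h]
        apply ih
        · simp at hlen ⊢; omega
        · exact hacc
        · intro h; simp at h
          rcases h with h | h
          · exact hc h.symm
          · exact hcur h

theorem pv_splitOn_free (cs : List Char) :
    ∀ p ∈ PySem.Chars.splitOn cs ['\n'], ('\n') ∉ p := by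
  unfold PySem.Chars.splitOn
  exact pv_go_free (cs.length + 1) cs [] [] (by omega) (by simp) (by simp)

-- A's foldl with non-empty accumulator appends everything
theorem pv_cleanLoop_go (l : List String) : ∀ acc : List String, acc ≠ [] →
    l.foldl (fun cleaned line =>
      let stripped := PySem.Str.rstrip line
      if stripped ≠ "" ∨ cleaned ≠ [] then cleaned ++ [stripped] else cleaned) acc
    = acc ++ l.map PySem.Str.rstrip := by
  induction l with
  | nil => intro acc _; simp
  | cons a l ih =>
    intro acc hacc
    simp only [List.foldl_cons]
    rw [if_pos (Or.inr hacc), ih _ (by simp)]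
    simp

-- A's loop builds exactly dropWhile-empty of the rstripped lines
theorem pv_cleanLoop_eq (lines : List String) :
    pvCleanLoop lines = (lines.map PySem.Str.rstrip).dropWhile (fun s => s == "") := by
  unfold pvCleanLoop
  induction lines with
  | nil => simp
  | cons a l ih =>
    simp only [List.foldl_cons, List.map_cons, List.dropWhile_cons]
    by_cases ha : PySem.Str.rstrip a = ""
    · simp only [ha]
      rw [if_neg (by simp), ih]
      simp
    · rw [if_pos (Or.inl ha), pv_cleanLoop_go _ _ (by simp)]
      simp [ha]

theorem pv_popLeading_eq (l : List String) :
    pvPopLeading l = l.dropWhile (fun s => s == "") := by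
  induction l with
  | nil => rfl
  | cons a l ih =>
    rw [pvPopLeading, List.dropWhile_cons]
    by_cases ha : a = "" <;> simp [ha, ih]

theorem pv_dropWhile_idem {α : Type} (p : α → Bool) (l : List α) :
    (l.dropWhile p).dropWhile p = l.dropWhile p := by
  induction l with
  | nil => rfl
  | cons a l ih =>
    rw [List.dropWhile_cons]
    by_cases ha : p a = true
    · simpa [ha] using ih
    · simp [ha]

theorem pv_popTrailing_eq (l : List String) :
    pvPopTrailing l = (l.reverse.dropWhile (fun s => s == "")).reverse := by
  induction l using List.reverseRecOn with
  | nil => rw [pvPopTrailing]; rfl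
  | append_singleton xs x ih =>
    rw [pvPopTrailing]
    split
    next y hy =>
      rw [List.getLast?_concat] at hy
      have hxy : y = x := by simpa using hy.symm
      subst hxy
      by_cases hx : y = ""
      · rw [if_pos hx, List.dropLast_concat, ih]
        simp [hx]
      · rw [if_neg hx]
        simp [hx]
    next hy =>
      rw [List.getLast?_concat] at hy; simp at hy

-- join over a list ending in a singleton
theorem pv_join_concat (nl : List Char) : ∀ (xs : List (List Char)) (y : List Char), xs ≠ [] →
    PySem.Chars.join nl (xs ++ [y]) = PySem.Chars.join nl xs ++ nl ++ y := by
  intro xs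
  induction xs with
  | nil => intro y h; exact absurd rfl h
  | cons a l ih =>
    intro y _
    cases l with
    | nil => simp [PySem.Chars.join_cons_cons, PySem.Chars.join_singleton]
    | cons b m =>
      rw [show (a :: b :: m) ++ [y] = a :: b :: (m ++ [y]) from rfl,
        PySem.Chars.join_cons_cons, PySem.Chars.join_cons_cons,
        show (b :: (m ++ [y])) = (b :: m) ++ [y] from rfl, ih y (by simp)]
      simp

-- reverse of a '\n'-join is the '\n'-join of the reversed reversed parts
theorem pv_join_reverse : ∀ ps : List (List Char),
    (PySem.Chars.join ['\n'] ps).reverse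
      = PySem.Chars.join ['\n'] ((ps.map List.reverse).reverse) := by
  intro ps
  induction ps with
  | nil => simp [PySem.Chars.join_nil]
  | cons a l ih =>
    cases l with
    | nil => simp [PySem.Chars.join_singleton]
    | cons b m =>
      rw [PySem.Chars.join_cons_cons]
      rw [List.map_cons, List.reverse_cons, pv_join_concat _ _ _ (by simp)]
      rw [← ih]
      simp

-- dropping leading '\n' of the join = dropping the leading empty parts
theorem pv_strip_front : ∀ ps : List (List Char), (∀ p ∈ ps, ('\n') ∉ p) →
    (PySem.Chars.join ['\n'] ps).dropWhile (fun c => c == '\n')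
      = PySem.Chars.join ['\n'] (ps.dropWhile (fun p => p.isEmpty)) := by
  intro ps
  induction ps with
  | nil => intro _; simp [PySem.Chars.join_nil]
  | cons a l ih =>
    intro hfree
    cases a with
    | nil =>
      cases l with
      | nil => simp [PySem.Chars.join_singleton, PySem.Chars.join_nil]
      | cons b m =>
        rw [PySem.Chars.join_cons_cons, List.nil_append, List.singleton_append,
          List.dropWhile_cons_of_pos (by simp),
          List.dropWhile_cons_of_pos (p := fun p : List Char => p.isEmpty) (by simp)]
        exact ih (fun p hp => hfree p (List.mem_cons_of_mem _ hp))
    | cons c cs =>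
      have hc : c ≠ '\n' := fun h => hfree (c :: cs) (by simp) (by simp [h])
      obtain ⟨t, ht⟩ : ∃ t, PySem.Chars.join ['\n'] ((c :: cs) :: l) = c :: t := by
        cases l with
        | nil => exact ⟨cs, by simp [PySem.Chars.join_singleton]⟩
        | cons b m => exact ⟨cs ++ '\n' :: PySem.Chars.join ['\n'] (b :: m), by
            rw [PySem.Chars.join_cons_cons]; simp⟩
      rw [ht, List.dropWhile_cons_of_neg (by simp [hc]), ← ht,
        List.dropWhile_cons_of_neg (p := fun p : List Char => p.isEmpty) (by simp)]

-- the key string-level identity: A's trim-by-list equals B's strip("\n") of the join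
theorem pv_key (lines : List String) (hfree : ∀ s ∈ lines, ('\n') ∉ s.toList) :
    PySem.Str.join "\n" (pvPopTrailing (pvPopLeading (pvCleanLoop lines)))
      = PySem.Str.stripChars (PySem.Str.join "\n" (lines.map PySem.Str.rstrip)) "\n" := by
  apply String.toList_inj.mp
  rw [PySem.Str.toList_join, PySem.Str.toList_stripChars, PySem.Str.toList_join]
  rw [pv_cleanLoop_eq, pv_popLeading_eq, pv_dropWhile_idem, pv_popTrailing_eq]
  have hnl : ("\n" : String).toList = ['\n'] := rfl
  rw [hnl]
  -- move to the char level
  set rs : List String := lines.map PySem.Str.rstrip with hrs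
  set ps : List (List Char) := rs.map String.toList with hps
  have hmap : ps = (lines.map String.toList).map PySem.Chars.rstrip := by
    rw [hps, hrs]
    simp [List.map_map, Function.comp_def, PySem.Str.toList_rstrip]
  have hfree' : ∀ p ∈ ps, ('\n') ∉ p := by
    intro p hp
    rw [hmap] at hp
    simp only [List.map_map, List.mem_map, Function.comp] at hp
    obtain ⟨s, hs, rfl⟩ := hp
    intro hmem
    unfold PySem.Chars.rstrip at hmem
    have : ('\n') ∈ s.toList := by
      have := (List.dropWhile_sublist (l := s.toList.reverse) PySem.Chars.isspace).mem
        (by simpa using hmem)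
      simpa using this
    exact hfree s hs this
  have hEmpt : ∀ s : String, ((s == "") : Bool) = s.toList.isEmpty := by
    intro s
    by_cases h : s = ""
    · subst h; rfl
    · have h2 : s.toList ≠ [] := fun hc => h (String.toList_inj.mp (by simp [hc]))
      have e1 : ((s == "") : Bool) = false := by simpa using h
      have e2 : s.toList.isEmpty = false := by simpa [List.isEmpty_iff] using h2
      rw [e1, e2]
  -- rewrite String-level dropWhile/reverse as char-level ones
  have h1 : ∀ l : List String,
      (l.dropWhile (fun s => s == "")).map String.toList
        = (l.map String.toList).dropWhile (fun p => p.isEmpty) := by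
    intro l
    rw [List.dropWhile_map]
    have hfun : ((fun p : List Char => p.isEmpty) ∘ String.toList)
        = (fun s : String => s == "") := by
      funext s
      exact (hEmpt s).symm
    rw [hfun]
  have hlist :
      (((rs.dropWhile (fun s => s == "")).reverse.dropWhile (fun s => s == "")).reverse).map String.toList
        = ((ps.dropWhile (fun p => p.isEmpty)).reverse.dropWhile (fun p => p.isEmpty)).reverse := by
    simp only [List.map_reverse, h1]
    rw [hps]
  rw [hlist]
  -- the pure char-level fact
  unfold PySem.Chars.stripChars
  have hqfun : (fun c : Char => List.contains ['\n'] c) = (fun c : Char => c == '\n') := by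
    funext c
    by_cases h : c = '\n' <;> simp [h]
  simp only [hqfun]
  rw [pv_strip_front ps hfree']
  set qs : List (List Char) := ps.dropWhile (fun p => p.isEmpty) with hqs
  have hfreeq : ∀ p ∈ qs, ('\n') ∉ p := fun p hp =>
    hfree' p ((List.dropWhile_sublist _).mem hp)
  rw [pv_join_reverse qs]
  rw [pv_strip_front _ (by
    intro p hp
    simp only [List.mem_reverse, List.mem_map] at hp
    obtain ⟨q, hq, rfl⟩ := hp
    simpa using hfreeq q hq)]
  have hrevmap : ((qs.map List.reverse).reverse).dropWhile (fun p => p.isEmpty)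
      = ((qs.reverse).dropWhile (fun p => p.isEmpty)).map List.reverse := by
    rw [← List.map_reverse, List.dropWhile_map]
    have : ((fun p : List Char => p.isEmpty) ∘ List.reverse) = (fun p : List Char => p.isEmpty) := by
      funext p; simp [Function.comp]
    rw [this]
  rw [hrevmap]
  rw [pv_join_reverse]
  simp

theorem pv_lines_free (snippet : String) :
    ∀ s ∈ (PySem.Str.split? snippet "\n").getD [], ('\n') ∉ s.toList := by
  have hmap := PySem.Str.split?_map snippet "\n"
  have hnl : ("\n" : String).toList = ['\n'] := rfl
  rw [hnl] at hmap
  unfold PySem.Chars.split? at hmap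
  rw [if_neg (by simp)] at hmap
  cases hsp : PySem.Str.split? snippet "\n" with
  | none => rw [hsp] at hmap; simp at hmap
  | some L =>
    rw [hsp] at hmap
    simp only [Option.map_some] at hmap
    have hL : L.map String.toList = PySem.Chars.splitOn snippet.toList ['\n'] :=
      Option.some.inj hmap
    intro s hs
    simp only [Option.getD_some] at hs
    exact pv_splitOn_free snippet.toList s.toList
      (hL ▸ List.mem_map_of_mem (f := String.toList) hs)

-- ===== VERDICT (by name: the statement is the Claim_ definition above) =====
theorem clean_snippet_py_spec : Claim_equal_clean_snippet_py := by
  intro snippet max_tokens _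
  unfold Spec_clean_snippet_py
  simp only [clean_snippet_py, clean_snippet_py_alt]
  rw [pv_key _ (pv_lines_free snippet)]
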